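-- pv_equiv track=rewrite | github.com/git-sandro/bookbot | stats.py | count_amount_chars
-- ===== SOURCE A (Python) =====
-- def count_amount_chars(book_text):
--     chars_amount = {}
--     for i in range(len(book_text)):
--         char = book_text[i].lower()
--         if char in chars_amount:
--             chars_amount[char] += 1
--         else:
--             chars_amount[char] = 1
--     return chars_amount
-- ===== SOURCE B (Python) =====
-- def count_amount_chars(book_text):
--     low = list(book_text.lower())
--     return {c: low.count(c) for c in dict.fromkeys(low)}
-- ===== Notes on version B (the rewrite author's own statement) =====
-- stated objective: alternative
-- what changed: B replaces A's single index-loop that increments per-character dict counters with a two-phase plan: lowercase the whole text once, collect the distinct characters in first-occurrence order with dict.fromkeys, then emit one count per distinct character via list.count.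
import Mathlib
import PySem

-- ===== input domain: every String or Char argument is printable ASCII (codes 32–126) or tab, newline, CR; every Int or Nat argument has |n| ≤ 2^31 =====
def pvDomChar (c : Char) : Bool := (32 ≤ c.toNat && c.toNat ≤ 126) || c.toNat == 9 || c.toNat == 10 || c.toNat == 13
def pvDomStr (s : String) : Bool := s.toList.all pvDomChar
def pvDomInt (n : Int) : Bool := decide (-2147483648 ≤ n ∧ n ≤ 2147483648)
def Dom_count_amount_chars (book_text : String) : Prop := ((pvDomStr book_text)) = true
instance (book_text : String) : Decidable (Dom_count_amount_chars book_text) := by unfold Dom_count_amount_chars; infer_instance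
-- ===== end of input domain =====

-- B replaces A's single index-loop of dict-counter increments with a two-phase plan: lowercase once,
-- take the distinct characters in first-occurrence order, then emit one count per distinct character.

-- ===== PORT A =====
-- A: for i in range(len(book_text)): char = book_text[i].lower(); increment-or-initialise chars_amount[char]
def count_amount_chars (book_text : String) : List (String × Int) :=
  let chars_amount : PySem.Dict String Int :=
    (PySem.List.pyRange 0 (PySem.Str.len book_text) 1).foldl
      (fun d i =>
        let char := PySem.Str.lower (String.ofList [PySem.List.pyGetD book_text.toList i ' '])
        if d.contains char then d.insert char (d.getD char 0 + 1)
        else d.insert char 1)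
      PySem.Dict.empty
  chars_amount.items

-- ===== PORT B =====
-- B: low = list(book_text.lower()); {c: low.count(c) for c in dict.fromkeys(low)}
def count_amount_chars_alt (book_text : String) : List (String × Int) :=
  let low := (PySem.Str.lower book_text).toList
  (PySem.List.dedup low).map (fun c => (String.ofList [c], (low.count c : Int)))

-- ===== PRECONDITION & SPEC =====
def Spec_count_amount_chars (book_text : String) (out : List (String × Int)) : Prop := out = count_amount_chars_alt book_text
instance (book_text : String) (out : List (String × Int)) : Decidable (Spec_count_amount_chars book_text out) := by unfold Spec_count_amount_chars; infer_instance

-- ===== CLAIM (what is proved, stated in full; the proofs are below) =====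
def Claim_equal_count_amount_chars : Prop := ∀ (book_text : String), Dom_count_amount_chars book_text → Spec_count_amount_chars book_text (count_amount_chars book_text)

-- ===== LEMMAS AND PROOFS =====

theorem pv_inj : Function.Injective (fun c : Char => String.ofList [c]) := by
  intro a b h
  have := congrArg String.toList h
  simpa using this

theorem pv_add_map {α β : Type} [BEq α] [LawfulBEq α] [BEq β] [LawfulBEq β]
    (m : α → β) (hm : Function.Injective m) (s : PySem.Set α) (x : α) :
    PySem.Set.add (s.map m) (m x) = (PySem.Set.add s x).map m := by
  by_cases hx : x ∈ s
  · simp [PySem.Set.add, PySem.Set.contains, hx, List.mem_map, hm.eq_iff]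
  · simp [PySem.Set.add, PySem.Set.contains, hx, List.mem_map, hm.eq_iff]

theorem pv_ofList_map {α β : Type} [BEq α] [LawfulBEq α] [BEq β] [LawfulBEq β]
    (m : α → β) (hm : Function.Injective m) (xs : List α) :
    PySem.Set.ofList (xs.map m) = (PySem.Set.ofList xs).map m := by
  have key : ∀ (l : List α) (s : PySem.Set α),
      (l.map m).foldl PySem.Set.add (s.map m) = (l.foldl PySem.Set.add s).map m := by
    intro l
    induction l with
    | nil => intro s; simp
    | cons x t ih => intro s; simpa [pv_add_map m hm s x] using ih (PySem.Set.add s x)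
  simpa [PySem.Set.ofList_eq_foldl] using key xs []


theorem pv_main (book_text : String) :
    count_amount_chars book_text = count_amount_chars_alt book_text := by
  unfold count_amount_chars count_amount_chars_alt
  set cs := book_text.toList with hcs
  have e1 : (PySem.List.pyRange 0 (PySem.Str.len book_text) 1).foldl
      (fun (d : PySem.Dict String Int) i =>
        let char := PySem.Str.lower (String.ofList [PySem.List.pyGetD cs i ' '])
        if d.contains char then d.insert char (d.getD char 0 + 1) else d.insert char 1)
      PySem.Dict.empty =
      ((PySem.List.pyRange 0 (PySem.Str.len book_text) 1).map
        (fun i => PySem.Str.lower (String.ofList [PySem.List.pyGetD cs i ' ']))).foldl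
      (fun (d : PySem.Dict String Int) x =>
        if d.contains x then d.insert x (d.getD x 0 + 1) else d.insert x 1)
      PySem.Dict.empty :=
    (List.foldl_map (f := fun i => PySem.Str.lower (String.ofList [PySem.List.pyGetD cs i ' ']))
      (g := fun (d : PySem.Dict String Int) x =>
        if d.contains x then d.insert x (d.getD x 0 + 1) else d.insert x 1)).symm
  show ((PySem.List.pyRange 0 (PySem.Str.len book_text) 1).foldl
      (fun (d : PySem.Dict String Int) i =>
        let char := PySem.Str.lower (String.ofList [PySem.List.pyGetD cs i ' '])
        if d.contains char then d.insert char (d.getD char 0 + 1) else d.insert char 1)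
      PySem.Dict.empty).items =
    (PySem.List.dedup (PySem.Str.lower book_text).toList).map
      (fun c => (String.ofList [c], ((PySem.Str.lower book_text).toList.count c : Int)))
  rw [e1]
  have h1 : (PySem.List.pyRange 0 (PySem.Str.len book_text) 1).map
      (fun i => PySem.Str.lower (String.ofList [PySem.List.pyGetD cs i ' '])) =
      cs.map (fun c => String.ofList [PySem.Chars.lowerChar c]) := by
    calc (PySem.List.pyRange 0 (PySem.Str.len book_text) 1).map
          (fun i => PySem.Str.lower (String.ofList [PySem.List.pyGetD cs i ' ']))
        = ((PySem.List.pyRange 0 (PySem.List.len cs) 1).map (fun j => PySem.List.pyGetD cs j ' ')).map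
            (fun c => PySem.Str.lower (String.ofList [c])) := by
          simp [List.map_map, PySem.Str.len, PySem.List.len, Function.comp, hcs]
      _ = cs.map (fun c => PySem.Str.lower (String.ofList [c])) := by
          rw [PySem.List.map_pyGetD_pyRange_zero cs ' ']
      _ = cs.map (fun c => String.ofList [PySem.Chars.lowerChar c]) := by
          refine List.map_congr_left ?_
          intro c _
          simp [PySem.Str.lower, PySem.Chars.lower]
  rw [h1]
  have h2 : ∀ (d : PySem.Dict String Int), ∀ x ∈ cs.map (fun c => String.ofList [PySem.Chars.lowerChar c]),
      (if d.contains x then d.insert x (d.getD x 0 + 1) else d.insert x 1) =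
      d.insert x (d.getD x 0 + 1) := by
    intro d x _
    by_cases h : d.contains x = true
    · simp [h]
    · simp only [Bool.not_eq_true] at h
      simp [h, PySem.Dict.getD_of_not_contains d 0 h]
  rw [PySem.List.foldl_congr_mem _ _ _ _ h2,
      PySem.Dict.foldl_insert_getD_add_one_eq_counter, PySem.Dict.items_counter]
  have hlow : (PySem.Str.lower book_text).toList = cs.map PySem.Chars.lowerChar := by
    simp [PySem.Str.lower, PySem.Chars.lower, hcs]
  rw [hlow, PySem.List.dedup_eq_ofList]
  have hmm : cs.map (fun c => String.ofList [PySem.Chars.lowerChar c]) =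
      (cs.map PySem.Chars.lowerChar).map (fun c => String.ofList [c]) := by
    simp [List.map_map, Function.comp]
  rw [hmm, pv_ofList_map _ pv_inj, List.map_map]
  refine List.map_congr_left ?_
  intro c _
  have hcount := List.count_map_of_injective (cs.map PySem.Chars.lowerChar) _ pv_inj c
  simpa [List.map_map] using hcount

-- ===== VERDICT (by name: the statement is the Claim_ definition above) =====
theorem count_amount_chars_spec : Claim_equal_count_amount_chars := by
  intro book_text _
  exact pv_main book_text
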